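-- pv_equiv track=rewrite | github.com/ghiggi/xencoding | xencoding/zarr/numcodecs.py | _get_lmza_filters_dict
-- ===== SOURCE A (Python) =====
-- def _get_lmza_filter(filter):
--     """Get lmza filter."""
--     import lzma
--
--     if filter == "delta":
--         filter = lzma.FILTER_DELTA
--     elif filter == "lmza2":
--         filter = lzma.FILTER_LZMA2
--     else:
--         filter = None
--     return filter
--
-- def _get_lmza_filters_dict(filters, delta_dist, clevel):
--     if isinstance(filters, type(None)):
--         return None
--
--     if isinstance(filters, str):
--         filters = [filters]
--     filters_dict = {filter: _get_lmza_filter(filter) for filter in filters if filter is not None}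
--
--     lmza_filters = []
--     for name, filter in filters_dict.items():
--         if name == "delta" and delta_dist is not None:
--             lmza_filters.append(dict(id=filter, dist=delta_dist))
--         elif name == "lmza2":
--             lmza_filters.append(dict(id=filter, preset=clevel))
--         else:
--             pass
--     if len(lmza_filters) == 0:
--         lmza_filters = None
--     return lmza_filters
-- ===== SOURCE B (Python) =====
-- FILTER_DELTA = 0x03   # lzma.FILTER_DELTA
-- FILTER_LZMA2 = 0x21   # lzma.FILTER_LZMA2
--
--
-- def _get_lmza_filters_dict(filters, delta_dist, clevel):
--     if filters is None:
--         return None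
--     if isinstance(filters, str):
--         filters = [filters]
--     # Closed form: only "delta" and "lmza2" can produce an entry, each at most once,
--     # ordered by their first occurrence in the list. No scan-with-dedup needed.
--     di = filters.index("delta") if ("delta" in filters and delta_dist is not None) else None
--     li = filters.index("lmza2") if "lmza2" in filters else None
--     d_entry = dict(id=FILTER_DELTA, dist=delta_dist)
--     l_entry = dict(id=FILTER_LZMA2, preset=clevel)
--     if di is not None and li is not None:
--         return [d_entry, l_entry] if di < li else [l_entry, d_entry]
--     if di is not None:
--         return [d_entry]
--     if li is not None:
--         return [l_entry]
--     return None
-- ===== Notes on version B (the rewrite author's own statement) =====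
-- stated objective: faster
-- what changed: B replaces A's dict-comprehension dedup pass plus items() loop by a closed form: since only the names 'delta' and 'lmza2' can ever produce an entry (each at most once after dedup), B just tests membership of those two names, takes their first-occurrence indices, and assembles the one- or two-element result ordered by index comparison.
import Mathlib
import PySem

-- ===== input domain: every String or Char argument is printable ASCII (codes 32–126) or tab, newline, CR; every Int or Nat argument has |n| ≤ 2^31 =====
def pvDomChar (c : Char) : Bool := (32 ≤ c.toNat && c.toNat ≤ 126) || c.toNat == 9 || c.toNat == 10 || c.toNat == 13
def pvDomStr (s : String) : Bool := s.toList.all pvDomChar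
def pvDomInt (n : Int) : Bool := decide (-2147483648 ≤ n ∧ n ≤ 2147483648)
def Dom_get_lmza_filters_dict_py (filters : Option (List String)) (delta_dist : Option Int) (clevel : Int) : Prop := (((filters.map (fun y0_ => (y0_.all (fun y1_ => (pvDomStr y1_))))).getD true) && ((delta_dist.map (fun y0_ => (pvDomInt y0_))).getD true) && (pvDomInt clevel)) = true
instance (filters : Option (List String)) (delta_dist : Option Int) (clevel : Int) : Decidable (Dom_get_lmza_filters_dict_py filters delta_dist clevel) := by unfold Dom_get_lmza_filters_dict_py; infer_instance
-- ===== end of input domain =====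

-- B drops A's dedup-dict pass + items() loop for a closed form over the two only productive
-- names ("delta"/"lmza2"): membership tests, first-occurrence indices, ordered by index comparison.
-- The `filters : Option (List String)` type means the Python str-argument branch and None list elements never arise here.

-- ===== PORT A =====
-- _get_lmza_filter: lzma.FILTER_DELTA = 3, lzma.FILTER_LZMA2 = 33 (CPython constants)
def pvLmzaFilter (f : String) : Option Int :=
  if f == "delta" then some 3
  else if f == "lmza2" then some 33
  else none

def get_lmza_filters_dict_py (filters : Option (List String)) (delta_dist : Option Int) (clevel : Int) : Option (List (List (String × Int))) :=
  match filters with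
  | none => none
  | some fs =>
    -- {filter: _get_lmza_filter(filter) for filter in filters if filter is not None} (elements are never None here)
    let filters_dict : PySem.Dict String (Option Int) :=
      fs.foldl (fun d f => d.insert f (pvLmzaFilter f)) PySem.Dict.empty
    -- for name, filter in filters_dict.items(): … ; in the taken branches the stored value is always `some`, so `.getD 0` is exact
    let lmza_filters : List (List (String × Int)) :=
      filters_dict.items.foldl (fun acc p =>
        if p.1 == "delta" && delta_dist.isSome then
          acc ++ [[("id", p.2.getD 0), ("dist", delta_dist.getD 0)]]
        else if p.1 == "lmza2" then
          acc ++ [[("id", p.2.getD 0), ("preset", clevel)]]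
        else acc) []
    if lmza_filters.length = 0 then none else some lmza_filters

-- ===== PORT B =====
def get_lmza_filters_dict_py_alt (filters : Option (List String)) (delta_dist : Option Int) (clevel : Int) : Option (List (List (String × Int))) :=
  match filters with
  | none => none
  | some fs =>
    let di : Option Nat := if fs.contains "delta" && delta_dist.isSome then PySem.List.index? fs "delta" else none
    let li : Option Nat := if fs.contains "lmza2" then PySem.List.index? fs "lmza2" else none
    let d_entry : List (String × Int) := [("id", 3), ("dist", delta_dist.getD 0)]
    let l_entry : List (String × Int) := [("id", 33), ("preset", clevel)]
    match di, li with
    | some i, some j => some (if i < j then [d_entry, l_entry] else [l_entry, d_entry])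
    | some _, none => some [d_entry]
    | none, some _ => some [l_entry]
    | none, none => none

-- ===== PRECONDITION & SPEC =====
def Spec_get_lmza_filters_dict_py (filters : Option (List String)) (delta_dist : Option Int) (clevel : Int) (out : Option (List (List (String × Int)))) : Prop := out = get_lmza_filters_dict_py_alt filters delta_dist clevel
instance (filters : Option (List String)) (delta_dist : Option Int) (clevel : Int) (out : Option (List (List (String × Int)))) : Decidable (Spec_get_lmza_filters_dict_py filters delta_dist clevel out) := by unfold Spec_get_lmza_filters_dict_py; infer_instance

-- ===== CLAIM (what is proved, stated in full; the proofs are below) =====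
def Claim_equal_get_lmza_filters_dict_py : Prop := ∀ (filters : Option (List String)) (delta_dist : Option Int) (clevel : Int), Dom_get_lmza_filters_dict_py filters delta_dist clevel → Spec_get_lmza_filters_dict_py filters delta_dist clevel (get_lmza_filters_dict_py filters delta_dist clevel)

-- ===== LEMMAS AND PROOFS =====

-- the per-name contribution of A's items loop (entries it appends for one fresh name)
def pvG (dd : Option Int) (cl : Int) (name : String) : List (List (String × Int)) :=
  if name == "delta" && dd.isSome then [[("id", 3), ("dist", dd.getD 0)]]
  else if name == "lmza2" then [[("id", 33), ("preset", cl)]]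
  else []

-- the closed form B computes, generalized by a `seen` exclusion set for the induction
def pvClosed (dd : Option Int) (cl : Int) (seen : PySem.Set String) (fs : List String) : List (List (String × Int)) :=
  match (if fs.contains "delta" && dd.isSome && !(PySem.Set.contains seen "delta") then PySem.List.index? fs "delta" else none),
        (if fs.contains "lmza2" && !(PySem.Set.contains seen "lmza2") then PySem.List.index? fs "lmza2" else none) with
  | some i, some j => if i < j then [[("id", 3), ("dist", dd.getD 0)], [("id", 33), ("preset", cl)]]
                      else [[("id", 33), ("preset", cl)], [("id", 3), ("dist", dd.getD 0)]]
  | some _, none => [[("id", 3), ("dist", dd.getD 0)]]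
  | none, some _ => [[("id", 33), ("preset", cl)]]
  | none, none => []

-- the fresh names A's dict retains, in order, starting from a given seen-set
def pvNewKeys (seen : PySem.Set String) : List String → List String
  | [] => []
  | x :: xs => if PySem.Set.contains seen x then pvNewKeys seen xs
               else x :: pvNewKeys (PySem.Set.add seen x) xs

theorem pv_update_eq_append_newKeys (fs : List String) (seen : PySem.Set String) :
    PySem.Set.update seen fs = seen ++ pvNewKeys seen fs := by
  induction fs generalizing seen with
  | nil => simp [PySem.Set.update_nil, pvNewKeys]
  | cons x xs ih =>
    rw [PySem.Set.update_cons, pvNewKeys]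
    by_cases h : PySem.Set.contains seen x
    · rw [if_pos h, PySem.Set.add_of_mem ((PySem.Set.contains_iff seen x).1 h), ih]
    · have hm : x ∉ seen := fun hmem => h ((PySem.Set.contains_iff seen x).2 hmem)
      rw [if_neg h, PySem.Set.add_of_not_mem hm, ih]
      simp

theorem pv_ofList_eq_newKeys (fs : List String) :
    PySem.Set.ofList fs = pvNewKeys PySem.Set.empty fs := by
  have h := pv_update_eq_append_newKeys fs PySem.Set.empty
  rw [show (PySem.Set.empty : PySem.Set String) = [] from rfl, PySem.Set.update_nil_left] at h
  simpa using h

theorem pv_getD_fold (fs : List String) (d : PySem.Dict String (Option Int)) (k : String) :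
    (fs.foldl (fun d f => d.insert f (pvLmzaFilter f)) d).getD k none
    = if k ∈ fs then pvLmzaFilter k else d.getD k none := by
  induction fs generalizing d with
  | nil => simp
  | cons x xs ih =>
    simp only [List.foldl_cons, ih, List.mem_cons, PySem.Dict.getD_insert]
    by_cases hxs : k ∈ xs
    · simp [hxs]
    · by_cases hx : k = x
      · simp [hx]
      · simp [hx, hxs]

-- A's items-loop body on a retained key (k, pvLmzaFilter k) is `acc ++ pvG dd cl k`
theorem pv_step_eq (dd : Option Int) (cl : Int)
    (acc : List (List (String × Int))) (k : String) :
    (if k == "delta" && dd.isSome then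
        acc ++ [[("id", (pvLmzaFilter k).getD 0), ("dist", dd.getD 0)]]
      else if k == "lmza2" then
        acc ++ [[("id", (pvLmzaFilter k).getD 0), ("preset", cl)]]
      else acc)
    = acc ++ pvG dd cl k := by
  unfold pvG
  by_cases h1 : k = "delta"
  · subst h1; by_cases h2 : dd.isSome <;> simp [pvLmzaFilter, h2]
  · by_cases h2 : k = "lmza2"
    · subst h2; simp [pvLmzaFilter]
    · simp [h1, h2]

-- A's whole items loop equals the flatMap of pvG over the deduped names
theorem pv_A_list_eq (dd : Option Int) (cl : Int) (fs : List String) :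
    (fs.foldl (fun d f => d.insert f (pvLmzaFilter f)) PySem.Dict.empty).items.foldl
      (fun acc p =>
        if p.1 == "delta" && dd.isSome then
          acc ++ [[("id", p.2.getD 0), ("dist", dd.getD 0)]]
        else if p.1 == "lmza2" then
          acc ++ [[("id", p.2.getD 0), ("preset", cl)]]
        else acc) []
    = (PySem.Set.ofList fs).flatMap (pvG dd cl) := by
  set d := fs.foldl (fun d f => d.insert f (pvLmzaFilter f)) PySem.Dict.empty with hd
  have hkeys : d.keys = PySem.Set.ofList fs := by
    rw [hd, PySem.Dict.keys_foldl_insert, PySem.Dict.keys_empty, PySem.Set.update_nil_left]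
  have hnd : d.keys.Nodup := by
    rw [hkeys]; exact PySem.Set.nodup_ofList fs
  have hitems : d.items = (PySem.Set.ofList fs).map (fun k => (k, pvLmzaFilter k)) := by
    rw [PySem.Dict.items_eq_map_keys d hnd none, hkeys]
    apply List.map_congr_left
    intro k hk
    have hkfs : k ∈ fs := (PySem.Set.mem_ofList fs k).1 hk
    rw [hd, pv_getD_fold]
    simp [hkfs]
  rw [hitems, List.foldl_map]
  rw [PySem.List.foldl_congr_mem _ _ _ _ (fun acc k _ => pv_step_eq dd cl acc k)]
  exact PySem.List.foldl_append_eq_flatMap _ _ _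


theorem pv_contains_add_ne (s : PySem.Set String) (x y : String) (h : y ≠ x) :
    PySem.Set.contains (PySem.Set.add s x) y = PySem.Set.contains s y := by
  rw [Bool.eq_iff_iff]
  simp [PySem.Set.mem_add, h]

-- core induction: the flatMap over fresh names is the closed form
theorem pv_main (dd : Option Int) (cl : Int) (fs : List String) (seen : PySem.Set String) :
    (pvNewKeys seen fs).flatMap (pvG dd cl) = pvClosed dd cl seen fs := by
  induction fs generalizing seen with
  | nil => simp [pvNewKeys, pvClosed]
  | cons x xs ih =>
    rw [pvNewKeys]
    by_cases hx : PySem.Set.contains seen x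
    · -- x already seen: drop it on both sides
      rw [if_pos hx, ih]
      unfold pvClosed
      by_cases hxd : x = "delta"
      · subst hxd
        simp only [List.contains_cons, hx, Bool.not_true, Bool.and_false, Bool.false_eq_true,
          if_false, PySem.List.index?_cons_of_ne xs (by decide : ("delta" : String) ≠ "lmza2"),
          (by decide : (("lmza2" : String) == "delta") = false), Bool.false_or]
        rcases hJ : PySem.List.index? xs "lmza2" with _ | j <;> split_ifs <;> rfl
      · by_cases hxl : x = "lmza2"
        · subst hxl
          simp only [List.contains_cons, hx, Bool.not_true, Bool.and_false, Bool.false_eq_true,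
            if_false, PySem.List.index?_cons_of_ne xs (by decide : ("lmza2" : String) ≠ "delta"),
            (by decide : (("delta" : String) == "lmza2") = false), Bool.false_or]
          rcases hI : PySem.List.index? xs "delta" with _ | i <;> split_ifs <;> rfl
        · have hbd : (("delta" : String) == x) = false := by simp [Ne.symm hxd]
          have hbl : (("lmza2" : String) == x) = false := by simp [Ne.symm hxl]
          simp only [List.contains_cons, hbd, hbl, Bool.false_or,
            PySem.List.index?_cons_of_ne xs hxd, PySem.List.index?_cons_of_ne xs hxl]
          rcases hI : PySem.List.index? xs "delta" with _ | i <;>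
            rcases hJ : PySem.List.index? xs "lmza2" with _ | j <;>
              split_ifs <;> simp_all
    · -- x is fresh: it contributes pvG x in front
      have hxm : x ∉ seen := fun h => hx ((PySem.Set.contains_iff seen x).2 h)
      rw [if_neg hx, List.flatMap_cons, ih]
      unfold pvClosed
      by_cases hxd : x = "delta"
      · subst hxd
        have hcd : PySem.Set.contains (PySem.Set.add seen "delta") "delta" = true :=
          (PySem.Set.contains_iff _ _).2 (by rw [PySem.Set.add_of_not_mem hxm]; simp)
        have hcl := pv_contains_add_ne seen "delta" "lmza2" (by decide)
        have hnx : (!PySem.Set.contains seen "delta") = true := by simp [hxm]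
        simp only [List.contains_cons, beq_self_eq_true, Bool.true_or, Bool.true_and, hcd,
          Bool.not_true, Bool.and_false, Bool.false_eq_true, if_false, hcl, hnx, Bool.and_true,
          PySem.List.index?_cons_self,
          PySem.List.index?_cons_of_ne xs (by decide : ("delta" : String) ≠ "lmza2"),
          (by decide : (("lmza2" : String) == "delta") = false), Bool.false_or]
        by_cases hs : dd.isSome
        · by_cases hm : ("lmza2" : String) ∈ xs
          · by_cases hsn : ("lmza2" : String) ∈ seen
            · simp [pvG, hs, hm, hsn]
            · obtain ⟨j, hJ⟩ := Option.isSome_iff_exists.mp ((PySem.List.index?_isSome_iff xs "lmza2").2 hm)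
              have hJ' : List.idxOf? "lmza2" xs = some j := by simpa using hJ
              simp [pvG, hs, hm, hsn, hJ']
          · simp [pvG, hs, hm]
        · simp only [Bool.not_eq_true] at hs
          simp only [pvG, hs, Bool.and_false, Bool.false_eq_true, if_false,
            beq_self_eq_true, Bool.true_and, Bool.false_and, List.nil_append,
            (by decide : (("delta" : String) == "lmza2") = false)]
          rcases hJ : PySem.List.index? xs "lmza2" with _ | j <;> split_ifs <;> rfl
      · by_cases hxl : x = "lmza2"
        · subst hxl
          have hcL : PySem.Set.contains (PySem.Set.add seen "lmza2") "lmza2" = true :=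
            (PySem.Set.contains_iff _ _).2 (by rw [PySem.Set.add_of_not_mem hxm]; simp)
          have hcd := pv_contains_add_ne seen "lmza2" "delta" (by decide)
          have hnx : (!PySem.Set.contains seen "lmza2") = true := by simp [hxm]
          simp only [List.contains_cons, beq_self_eq_true, Bool.true_or, Bool.true_and, hcL,
            Bool.not_true, Bool.and_false, Bool.false_eq_true, if_false, hcd, hnx, Bool.and_true,
            PySem.List.index?_cons_self,
            PySem.List.index?_cons_of_ne xs (by decide : ("lmza2" : String) ≠ "delta"),
            (by decide : (("delta" : String) == "lmza2") = false), Bool.false_or]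
          by_cases hm : ("delta" : String) ∈ xs
          · by_cases hsn : ("delta" : String) ∈ seen
            · simp [pvG, hm, hsn]
            · by_cases hs : dd.isSome
              · obtain ⟨i, hI⟩ := Option.isSome_iff_exists.mp ((PySem.List.index?_isSome_iff xs "delta").2 hm)
                have hI' : List.idxOf? "delta" xs = some i := by simpa using hI
                simp [pvG, hs, hm, hsn, hI']
              · simp only [Bool.not_eq_true] at hs
                simp [pvG, hs, hm, hsn]
          · simp [pvG, hm]
        · have hbd : (("delta" : String) == x) = false := by simp [Ne.symm hxd]
          have hbl : (("lmza2" : String) == x) = false := by simp [Ne.symm hxl]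
          have hcd := pv_contains_add_ne seen x "delta" (Ne.symm hxd)
          have hcl := pv_contains_add_ne seen x "lmza2" (Ne.symm hxl)
          simp only [List.contains_cons, hbd, hbl, Bool.false_or, hcd, hcl,
            PySem.List.index?_cons_of_ne xs hxd, PySem.List.index?_cons_of_ne xs hxl]
          have hg0 : pvG dd cl x = [] := by simp [pvG, hxd, hxl]
          rw [hg0, List.nil_append]
          rcases hI : PySem.List.index? xs "delta" with _ | i <;>
            rcases hJ : PySem.List.index? xs "lmza2" with _ | j <;>
              split_ifs <;> simp_all

-- ===== VERDICT (by name: the statement is the Claim_ definition above) =====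
theorem get_lmza_filters_dict_py_spec : Claim_equal_get_lmza_filters_dict_py := by
  intro filters dd cl _
  unfold Spec_get_lmza_filters_dict_py
  cases filters with
  | none => rfl
  | some fs =>
    unfold get_lmza_filters_dict_py get_lmza_filters_dict_py_alt
    simp only
    rw [pv_A_list_eq, pv_ofList_eq_newKeys, pv_main]
    unfold pvClosed
    have hc : ∀ v : String, PySem.Set.contains PySem.Set.empty v = false := fun v => rfl
    simp only [hc, Bool.not_false, Bool.and_true]
    rcases hI : (if (fs.contains "delta" && dd.isSome) = true then PySem.List.index? fs "delta" else none) with _ | i <;>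
      rcases hJ : (if fs.contains "lmza2" = true then PySem.List.index? fs "lmza2" else none) with _ | j <;>
        simp <;> split_ifs <;> first | rfl | exact not_false
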